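-- pv_equiv track=rewrite | github.com/emjgood1995/bird-dashboard | app.py | status_color_map
-- ===== SOURCE A (Python) =====
-- NATURE_PALETTE = [
--     "#3d6b44",  # deep forest
--     "#4a7090",  # lake blue
--     "#b89040",  # harvest gold
--     "#7a5c3d",  # dark bark
--     "#6b7c4a",  # olive moss
--     "#8c5a70",  # bramble berry
--     "#5c8c5c",  # leaf green
--     "#6a90b0",  # sky blue
--     "#d4ac60",  # warm amber
--     "#a07850",  # warm earth
--     "#8c9c60",  # lichen
--     "#4a5c70",  # dusk blue
--     "#c47a5a",  # autumn terracotta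
--     "#7aaa6a",  # fresh growth
--     "#8ab4c8",  # pale sky
--     "#c4a07a",  # sandy loam
--     "#a3c47a",  # spring sage
--     "#607080",  # slate
--     "#8c6b8c",  # heather
--     "#90a890",  # soft sage
-- ]
--
-- STATUS_COLORS = {
--     "Green":            "#5c8c5c",
--     "Amber":            "#d4ac60",
--     "Red":              "#c47a5a",
--     "Review Recording": "#8c9c8c",
--     "Introduced":       "#4a7090",
--     "Migrant":          "#6a90b0",
--     "Scarce Migrant":   "#8ab4c8",
-- }
--
-- def status_color_map(statuses):
--     """Build a color_discrete_map for a list of status strings."""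
--     cmap = {}
--     fallback = [c for c in NATURE_PALETTE if c not in STATUS_COLORS.values()]
--     fi = 0
--     for s in statuses:
--         if s in STATUS_COLORS:
--             cmap[s] = STATUS_COLORS[s]
--         else:
--             cmap[s] = fallback[fi % len(fallback)]
--             fi += 1
--     return cmap
-- ===== SOURCE B (Python) =====
-- NATURE_PALETTE = [
--     "#3d6b44", "#4a7090", "#b89040", "#7a5c3d", "#6b7c4a",
--     "#8c5a70", "#5c8c5c", "#6a90b0", "#d4ac60", "#a07850",
--     "#8c9c60", "#4a5c70", "#c47a5a", "#7aaa6a", "#8ab4c8",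
--     "#c4a07a", "#a3c47a", "#607080", "#8c6b8c", "#90a890",
-- ]
--
-- STATUS_COLORS = {
--     "Green":            "#5c8c5c",
--     "Amber":            "#d4ac60",
--     "Red":              "#c47a5a",
--     "Review Recording": "#8c9c8c",
--     "Introduced":       "#4a7090",
--     "Migrant":          "#6a90b0",
--     "Scarce Migrant":   "#8ab4c8",
-- }
--
-- def status_color_map(statuses):
--     """Build a color_discrete_map for a list of status strings."""
--     used = set(STATUS_COLORS.values())
--     fallback = [c for c in NATURE_PALETTE if c not in used]
--     n = len(fallback)
--     # prefix counts of unknown statuses: counts[j] = #unknown among statuses[:j]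
--     counts = [0]
--     for s in statuses:
--         counts.append(counts[-1] + (s not in STATUS_COLORS))
--     return {s: STATUS_COLORS[s] if s in STATUS_COLORS else fallback[i % n]
--             for s, i in zip(statuses, counts)}
-- ===== Notes on version B (the rewrite author's own statement) =====
-- stated objective: alternative
-- what changed: Replaces A's single stateful loop that interleaves a mutable dict with an incrementing fallback counter by a pure prefix-count scan followed by a dict comprehension over zip(statuses, counts).
import Mathlib
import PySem

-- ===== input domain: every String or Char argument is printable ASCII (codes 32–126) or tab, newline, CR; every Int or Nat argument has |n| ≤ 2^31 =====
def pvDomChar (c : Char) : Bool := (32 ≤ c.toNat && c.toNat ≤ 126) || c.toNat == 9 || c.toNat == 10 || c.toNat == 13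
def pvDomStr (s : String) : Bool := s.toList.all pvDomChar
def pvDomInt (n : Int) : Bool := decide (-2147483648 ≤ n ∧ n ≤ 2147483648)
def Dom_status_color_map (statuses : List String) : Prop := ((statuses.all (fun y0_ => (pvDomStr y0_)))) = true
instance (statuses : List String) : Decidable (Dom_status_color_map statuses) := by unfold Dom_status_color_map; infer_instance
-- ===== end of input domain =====

-- B replaces A's single stateful loop (mutable dict + incrementing counter) by a pure
-- prefix-count scan followed by a dict comprehension over zip; same cost (alternative).

-- ===== PORT A =====
def NATURE_PALETTE : List String :=
  ["#3d6b44", "#4a7090", "#b89040", "#7a5c3d", "#6b7c4a",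
   "#8c5a70", "#5c8c5c", "#6a90b0", "#d4ac60", "#a07850",
   "#8c9c60", "#4a5c70", "#c47a5a", "#7aaa6a", "#8ab4c8",
   "#c4a07a", "#a3c47a", "#607080", "#8c6b8c", "#90a890"]

def STATUS_COLORS : PySem.Dict String String :=
  PySem.Dict.ofList
    [("Green", "#5c8c5c"), ("Amber", "#d4ac60"), ("Red", "#c47a5a"),
     ("Review Recording", "#8c9c8c"), ("Introduced", "#4a7090"),
     ("Migrant", "#6a90b0"), ("Scarce Migrant", "#8ab4c8")]

-- fallback[fi % len(fallback)]: fallback is a fixed nonempty list, so the index is always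
-- in range and the `.getD ""` default is never taken.
def status_color_map (statuses : List String) : List (String × String) :=
  let fallback := NATURE_PALETTE.filter (fun c => !(STATUS_COLORS.values.contains c))
  let r := statuses.foldl
    (fun (st : PySem.Dict String String × Int) s =>
      if STATUS_COLORS.contains s then
        (st.1.insert s (STATUS_COLORS.getD s ""), st.2)
      else
        (st.1.insert s ((PySem.List.pyGet? fallback (PySem.Int.mod st.2 (fallback.length : Int))).getD ""),
         st.2 + 1))
    (PySem.Dict.empty, 0)
  r.1.items

-- ===== PORT B =====
-- counts[-1] is ported as pyGet? acc (-1) |>.getD 0; acc is never empty (starts at [0]).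
def status_color_map_alt (statuses : List String) : List (String × String) :=
  let fallback := NATURE_PALETTE.filter (fun c => !(STATUS_COLORS.values.contains c))
  let n : Int := fallback.length
  let counts := statuses.foldl
    (fun (acc : List Int) s =>
      acc ++ [(PySem.List.pyGet? acc (-1)).getD 0 + (if STATUS_COLORS.contains s then 0 else 1)])
    [0]
  ((statuses.zip counts).foldl
    (fun (d : PySem.Dict String String) p =>
      d.insert p.1
        (if STATUS_COLORS.contains p.1 then STATUS_COLORS.getD p.1 ""
         else (PySem.List.pyGet? fallback (PySem.Int.mod p.2 n)).getD ""))
    PySem.Dict.empty).items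

-- ===== PRECONDITION & SPEC =====
def Spec_status_color_map (statuses : List String) (out : List (String × String)) : Prop := out = status_color_map_alt statuses
instance (statuses : List String) (out : List (String × String)) : Decidable (Spec_status_color_map statuses out) := by unfold Spec_status_color_map; infer_instance

-- ===== CLAIM (what is proved, stated in full; the proofs are below) =====
def Claim_equal_status_color_map : Prop := ∀ (statuses : List String), Dom_status_color_map statuses → Spec_status_color_map statuses (status_color_map statuses)

-- ===== LEMMAS AND PROOFS =====

-- δ s = 1 iff s is an unknown status
def pvDelta (s : String) : Int := if STATUS_COLORS.contains s then 0 else 1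

-- scan of prefix counts starting at k (k, k+δ, …)
def pvScan : List String → Int → List Int
  | [], k => [k]
  | s :: xs, k => k :: pvScan xs (k + pvDelta s)

theorem pyGet_neg_one (acc : List Int) :
    (PySem.List.pyGet? acc (-1)).getD 0 = acc.getLastD 0 := by
  rw [PySem.List.pyGet?_neg_one, List.getLastD_eq_getLast?]

-- the counts fold produces acc.dropLast ++ pvScan xs (last acc)
theorem counts_fold (xs : List String) : ∀ (acc : List Int), acc ≠ [] →
    xs.foldl (fun (acc : List Int) s =>
        acc ++ [(PySem.List.pyGet? acc (-1)).getD 0 + (if STATUS_COLORS.contains s then 0 else 1)]) acc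
      = acc.dropLast ++ pvScan xs (acc.getLastD 0) := by
  induction xs with
  | nil =>
    intro acc h
    simp [pvScan, List.getLastD_eq_getLast?, List.getLast?_eq_some_getLast h,
          List.dropLast_append_getLast h]
  | cons s t ih =>
    intro acc h
    simp only [List.foldl_cons]
    rw [pyGet_neg_one acc]
    rw [ih _ (by simp)]
    have hd : (acc ++ [acc.getLastD 0 + (if STATUS_COLORS.contains s then 0 else 1)]).dropLast = acc := by
      simp
    have hl : (acc ++ [acc.getLastD 0 + (if STATUS_COLORS.contains s then 0 else 1)]).getLastD 0
        = acc.getLastD 0 + pvDelta s := by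
      simp [pvDelta]
    rw [hd, hl, pvScan]
    rw [List.getLastD_eq_getLast?, List.getLast?_eq_some_getLast h]
    calc acc ++ pvScan t ((some (acc.getLast h)).getD 0 + pvDelta s)
        = (acc.dropLast ++ [acc.getLast h]) ++ pvScan t ((some (acc.getLast h)).getD 0 + pvDelta s) := by
          rw [List.dropLast_append_getLast h]
      _ = acc.dropLast ++ (some (acc.getLast h)).getD 0 :: pvScan t ((some (acc.getLast h)).getD 0 + pvDelta s) := by
          simp

theorem zip_pvScan (xs : List String) : ∀ (k : Int),
    xs.zip (pvScan xs k) = match xs with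
      | [] => []
      | s :: t => (s, k) :: t.zip (pvScan t (k + pvDelta s)) := by
  cases xs <;> intro k <;> simp [pvScan]

-- main invariant: A's fold with counter k equals B's fold over the zip with pvScan xs k
theorem main_inv (fallback : List String) (xs : List String) :
    ∀ (d : PySem.Dict String String) (k : Int),
    (xs.foldl
      (fun (st : PySem.Dict String String × Int) s =>
        if STATUS_COLORS.contains s then
          (st.1.insert s (STATUS_COLORS.getD s ""), st.2)
        else
          (st.1.insert s ((PySem.List.pyGet? fallback (PySem.Int.mod st.2 (fallback.length : Int))).getD ""),
           st.2 + 1)) (d, k)).1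
    = (xs.zip (pvScan xs k)).foldl
        (fun (dd : PySem.Dict String String) p =>
          dd.insert p.1
            (if STATUS_COLORS.contains p.1 then STATUS_COLORS.getD p.1 ""
             else (PySem.List.pyGet? fallback (PySem.Int.mod p.2 (fallback.length : Int))).getD "")) d := by
  induction xs with
  | nil => intro d k; simp
  | cons s t ih =>
    intro d k
    rw [zip_pvScan]
    simp only [List.foldl_cons]
    by_cases hc : STATUS_COLORS.contains s = true
    · simp only [hc, if_pos]
      rw [ih]
      simp [pvDelta, hc]
    · simp only [hc]
      rw [ih]
      simp [pvDelta, hc]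

-- ===== VERDICT (by name: the statement is the Claim_ definition above) =====
theorem status_color_map_spec : Claim_equal_status_color_map := by
  intro statuses _
  unfold Spec_status_color_map
  simp only [status_color_map, status_color_map_alt]
  rw [counts_fold statuses [0] (by simp)]
  have h1 : ([0] : List Int).dropLast = [] := rfl
  have h2 : ([0] : List Int).getLastD 0 = 0 := rfl
  rw [h1, h2, List.nil_append, main_inv]
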